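-- pv_equiv track=rewrite | github.com/unitedcodelab/plataforma-cursos | src/scripts/import_students_2024_01.py | clean_phones
-- ===== SOURCE A (Python) =====
-- def clean_phones(phones):
--     phones = phones.split()
--     cleaned_phones = []
--
--     for i in range(0, len(phones), 2):
--         if i + 1 < len(phones):
--             cleaned_phone = phones[i] + phones[i + 1]
--             cleaned_phones.append(cleaned_phone)
--
--         else:
--             cleaned_phones.append(phones[i])
--
--     return cleaned_phones
-- ===== SOURCE B (Python) =====
-- def clean_phones(phones):
--     def pair(tokens):
--         if len(tokens) < 2:
--             return tokens[:]
--         return [tokens[0] + tokens[1]] + pair(tokens[2:])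
--     return pair(phones.split())
-- ===== Notes on version B (the rewrite author's own statement) =====
-- stated objective: alternative
-- what changed: Replaces the index-stepping range(0,len,2) loop with in-loop i+1<len guard by structural recursion on the token list that consumes two tokens per step, the unpaired tail falling out of the base case.
import Mathlib
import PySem

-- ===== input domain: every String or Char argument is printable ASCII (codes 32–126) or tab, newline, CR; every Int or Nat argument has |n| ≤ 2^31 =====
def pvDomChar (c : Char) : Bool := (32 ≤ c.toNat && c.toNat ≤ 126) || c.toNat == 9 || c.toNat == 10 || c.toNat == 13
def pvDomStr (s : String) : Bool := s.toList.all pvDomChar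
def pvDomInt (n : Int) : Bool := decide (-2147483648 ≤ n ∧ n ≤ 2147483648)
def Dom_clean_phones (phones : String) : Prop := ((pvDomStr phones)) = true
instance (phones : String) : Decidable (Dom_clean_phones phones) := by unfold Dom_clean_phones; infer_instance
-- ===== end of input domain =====

-- B replaces A's index-stepping range(0,len,2) loop by structural recursion consuming two tokens per step (alternative decomposition, same cost).

-- ===== PORT A =====
-- the for-loop of A over range(0, len(ts), 2), as a fold over the split tokens
def cleanLoopA (ts : List String) : List String :=
  (PySem.List.pyRange 0 (ts.length : Int) 2).foldl
    (fun acc i =>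
      if i + 1 < (ts.length : Int) then
        acc ++ [PySem.List.pyGetD ts i "" ++ PySem.List.pyGetD ts (i + 1) ""]
      else
        acc ++ [PySem.List.pyGetD ts i ""]) []

def clean_phones (phones : String) : List String :=
  cleanLoopA (PySem.Str.split₀ phones)

-- ===== PORT B =====
def pairTokens : List String → List String
  | a :: b :: rest => (a ++ b) :: pairTokens rest
  | ts => ts

def clean_phones_alt (phones : String) : List String :=
  pairTokens (PySem.Str.split₀ phones)

-- ===== PRECONDITION & SPEC =====
def Spec_clean_phones (phones : String) (out : List String) : Prop := out = clean_phones_alt phones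
instance (phones : String) (out : List String) : Decidable (Spec_clean_phones phones out) := by unfold Spec_clean_phones; infer_instance

-- ===== CLAIM (what is proved, stated in full; the proofs are below) =====
def Claim_equal_clean_phones : Prop := ∀ (phones : String), Dom_clean_phones phones → Spec_clean_phones phones (clean_phones phones)

-- ===== LEMMAS AND PROOFS =====

-- the if-then-else body of A, as a function of the index
def pvBodyA (ts : List String) (i : Int) : String :=
  if i + 1 < (ts.length : Int) then
    PySem.List.pyGetD ts i "" ++ PySem.List.pyGetD ts (i + 1) ""
  else
    PySem.List.pyGetD ts i ""

lemma pvRange_two (n : Nat) :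
    PySem.List.pyRange 0 (n : Int) 2 = (List.range ((n + 1) / 2)).map (fun k : Nat => (2 : Int) * (k : Int)) := by
  rw [PySem.List.pyRange_of_pos 0 (n : Int) (by norm_num)]
  rcases Nat.eq_zero_or_pos n with h | h
  · subst h; simp
  · rw [if_pos (by exact_mod_cast h)]
    have hcnt : (((n : Int) - 0 + 2 - 1) / 2).toNat = (n + 1) / 2 := by
      have h1 : ((n : Int) - 0 + 2 - 1) = ((n + 1 : Nat) : Int) := by push_cast; ring
      rw [h1, show ((2:Int)) = ((2:Nat):Int) by norm_num, ← Int.natCast_div, Int.toNat_natCast]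
    rw [hcnt]
    apply List.map_congr_left
    intro k _
    ring

lemma pvMapBody (ts : List String) :
    (List.range ((ts.length + 1) / 2)).map (fun k : Nat => pvBodyA ts (2 * (k : Int))) = pairTokens ts := by
  induction ts using pairTokens.induct with
  | case1 a b rest ih =>
    have hlen : (a :: b :: rest).length = rest.length + 2 := by simp
    rw [hlen, show (rest.length + 2 + 1) / 2 = (rest.length + 1) / 2 + 1 by omega,
        List.range_succ_eq_map, List.map_cons, List.map_map]
    have h0 : pvBodyA (a :: b :: rest) (2 * ((0 : Nat) : Int)) = a ++ b := by
      simp only [pvBodyA, hlen]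
      rw [if_pos (by push_cast; omega)]
      rw [show (2 * ((0:Nat):Int)) = ((0:Nat):Int) by norm_num,
          show ((0:Nat):Int) + 1 = ((1:Nat):Int) by norm_num]
      rw [PySem.List.pyGetD_natCast, PySem.List.pyGetD_natCast]
      rfl
    have hsh : ∀ k : Nat, pvBodyA (a :: b :: rest) (2 * ((k + 1 : Nat) : Int)) = pvBodyA rest (2 * (k : Int)) := by
      intro k
      simp only [pvBodyA, hlen]
      rw [show (2 * ((k + 1 : Nat) : Int)) = ((2 * k + 2 : Nat) : Int) by push_cast; ring,
          show ((2 * k + 2 : Nat) : Int) + 1 = ((2 * k + 3 : Nat) : Int) by push_cast; ring,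
          show (2 * ((k : Nat) : Int)) = ((2 * k : Nat) : Int) by push_cast; ring,
          show ((2 * k : Nat) : Int) + 1 = ((2 * k + 1 : Nat) : Int) by push_cast; ring]
      rw [PySem.List.pyGetD_natCast, PySem.List.pyGetD_natCast,
          PySem.List.pyGetD_natCast, PySem.List.pyGetD_natCast]
      simp only [Nat.cast_lt]
      have e2 : (a :: b :: rest).getD (2 * k + 2) "" = rest.getD (2 * k) "" := by
        rw [show 2 * k + 2 = (2 * k) + 1 + 1 from rfl, List.getD_cons_succ, List.getD_cons_succ]
      have e3 : (a :: b :: rest).getD (2 * k + 3) "" = rest.getD (2 * k + 1) "" := by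
        rw [show 2 * k + 3 = (2 * k + 1) + 1 + 1 from rfl, List.getD_cons_succ, List.getD_cons_succ]
      by_cases hl : 2 * k + 1 < rest.length
      · rw [if_pos (by omega), if_pos hl, e2, e3]
      · rw [if_neg (by omega), if_neg hl, e2]
    rw [h0]
    rw [show ((fun k : Nat => pvBodyA (a :: b :: rest) (2 * (k : Int))) ∘ Nat.succ) =
          (fun k : Nat => pvBodyA rest (2 * (k : Int))) from funext (fun k => hsh k), ih]
    rfl
  | case2 ts h =>
    rcases ts with _ | ⟨a, _ | ⟨b, rest⟩⟩
    · rfl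
    · simp only [List.length_singleton]
      rw [show (1 + 1) / 2 = 1 by norm_num]
      simp only [List.range_one, List.map_cons, List.map_nil]
      simp only [pvBodyA]
      rw [if_neg (by norm_num)]
      rw [show (2 * ((0:Nat):Int)) = ((0:Nat):Int) by norm_num, PySem.List.pyGetD_natCast]
      rfl
    · exact absurd rfl (fun hh => h a b rest hh)

lemma pvLoopA_eq (ts : List String) : cleanLoopA ts = pairTokens ts := by
  unfold cleanLoopA
  refine (PySem.List.foldl_congr_mem (PySem.List.pyRange 0 (ts.length : Int) 2) _
      (fun acc i => acc ++ [pvBodyA ts i]) []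
      (by intro acc i _
          show _ = acc ++ [pvBodyA ts i]
          unfold pvBodyA; split_ifs <;> rfl)).trans ?_
  rw [PySem.List.foldl_append_singleton_eq_map, List.nil_append]
  rw [pvRange_two, List.map_map]
  exact pvMapBody ts

-- ===== VERDICT (by name: the statement is the Claim_ definition above) =====
theorem clean_phones_spec : Claim_equal_clean_phones := by
  intro phones _
  unfold Spec_clean_phones clean_phones clean_phones_alt
  exact pvLoopA_eq _
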